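-- pv_equiv track=rewrite | github.com/slidracoon72/leetcode | Solutions/ThreeConsecutiveOdds.py | threeConsecutiveOdds1
-- ===== SOURCE A (Python) =====
-- from typing import List
--
-- def threeConsecutiveOdds1(arr: List[int]) -> bool:
--     # Get the length of the input array
--     n = len(arr)
--     # If array length is less than 3, no three consecutive odds possible
--     if n < 3:
--         return False
--
--     # Initialize counter for consecutive odd numbers
--     odd_count = 0
--
--     # Iterate through each number in the array
--     for num in arr:
--         # Check if the number is odd using bitwise AND (1 if odd, 0 if even)
--         if num & 1:
--             # Increment the count of consecutive odds
--             odd_count += 1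
--         else:
--             # Reset the count when an even number is encountered
--             odd_count = 0
--
--         # If three consecutive odd numbers are found, return True
--         if odd_count == 3:
--             return True
--
--     # Return False if no three consecutive odd numbers are found
--     return False
-- ===== SOURCE B (Python) =====
-- from typing import List
--
-- def threeConsecutiveOdds1(arr: List[int]) -> bool:
--     # Stateless sliding window: check every consecutive triple directly.
--     return any(a & 1 and b & 1 and c & 1 for a, b, c in zip(arr, arr[1:], arr[2:]))
-- ===== Notes on version B (the rewrite author's own statement) =====
-- stated objective: idiomatic
-- what changed: Replaced the stateful consecutive-odd counter with early return by a stateless one-liner that zips the list with its two shifts and checks each triple of neighbours directly.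
import Mathlib
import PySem

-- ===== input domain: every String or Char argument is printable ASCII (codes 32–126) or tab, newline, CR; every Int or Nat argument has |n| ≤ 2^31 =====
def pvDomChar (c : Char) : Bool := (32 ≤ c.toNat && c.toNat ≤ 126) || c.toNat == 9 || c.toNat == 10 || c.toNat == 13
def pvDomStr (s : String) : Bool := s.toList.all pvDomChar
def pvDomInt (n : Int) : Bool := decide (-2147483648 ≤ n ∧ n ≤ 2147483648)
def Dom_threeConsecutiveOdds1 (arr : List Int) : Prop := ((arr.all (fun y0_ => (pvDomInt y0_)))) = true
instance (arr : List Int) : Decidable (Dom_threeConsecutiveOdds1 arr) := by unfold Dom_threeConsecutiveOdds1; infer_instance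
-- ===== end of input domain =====

-- B replaces A's stateful consecutive-odd counter with a stateless zip-of-shifts triple scan (idiomatic one-liner).


-- ===== PORT A =====
-- the loop 'for num in arr' carrying odd_count, with the early 'return True' on odd_count == 3
def tcoGoA : List Int → Int → Bool
  | [], _ => false
  | num :: rest, oddCount =>
    let oddCount' := if PySem.Int.band num 1 ≠ 0 then oddCount + 1 else 0
    if oddCount' = 3 then true else tcoGoA rest oddCount'

def threeConsecutiveOdds1 (arr : List Int) : Bool :=
  if arr.length < 3 then false else tcoGoA arr 0

-- ===== PORT B =====
-- any(a & 1 and b & 1 and c & 1 for a, b, c in zip(arr, arr[1:], arr[2:]))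
def threeConsecutiveOdds1_alt (arr : List Int) : Bool :=
  ((arr.zip (PySem.List.slice arr (some 1) none)).zip (PySem.List.slice arr (some 2) none)).any
    (fun p => PySem.Int.band p.1.1 1 ≠ 0 && PySem.Int.band p.1.2 1 ≠ 0 && PySem.Int.band p.2 1 ≠ 0)

-- ===== PRECONDITION & SPEC =====
def Spec_threeConsecutiveOdds1 (arr : List Int) (out : Bool) : Prop := out = threeConsecutiveOdds1_alt arr
instance (arr : List Int) (out : Bool) : Decidable (Spec_threeConsecutiveOdds1 arr out) := by unfold Spec_threeConsecutiveOdds1; infer_instance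

-- ===== CLAIM (what is proved, stated in full; the proofs are below) =====
def Claim_equal_threeConsecutiveOdds1 : Prop := ∀ (arr : List Int), Dom_threeConsecutiveOdds1 arr → Spec_threeConsecutiveOdds1 arr (threeConsecutiveOdds1 arr)

-- ===== LEMMAS AND PROOFS =====

-- the triple-window predicate in structural form, bridging the two ports
def tcoW : List Int → Bool
  | a :: b :: c :: r =>
    (PySem.Int.band a 1 ≠ 0 && PySem.Int.band b 1 ≠ 0 && PySem.Int.band c 1 ≠ 0) || tcoW (b :: c :: r)
  | _ => false

-- 'the first element exists and is odd'
def tcoP1 : List Int → Bool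
  | a :: _ => PySem.Int.band a 1 ≠ 0
  | _ => false

-- 'the first two elements exist and are odd'
def tcoP2 : List Int → Bool
  | a :: b :: _ => PySem.Int.band a 1 ≠ 0 && PySem.Int.band b 1 ≠ 0
  | _ => false

theorem tcoW_cons (a : Int) (r : List Int) :
    tcoW (a :: r) = ((decide (PySem.Int.band a 1 ≠ 0) && tcoP2 r) || tcoW r) := by
  match r with
  | [] => simp [tcoW, tcoP2]
  | [b] => simp [tcoW, tcoP2]
  | b :: c :: t => simp [tcoW, tcoP2, Bool.and_assoc]

theorem tcoP2_cons (a : Int) (r : List Int) :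
    tcoP2 (a :: r) = (decide (PySem.Int.band a 1 ≠ 0) && tcoP1 r) := by
  match r with
  | [] => simp [tcoP2, tcoP1]
  | b :: t => simp [tcoP2, tcoP1]

theorem tcoP2_le_P1 (r : List Int) (h : tcoP2 r = true) : tcoP1 r = true := by
  match r with
  | [] => simp [tcoP2] at h
  | [a] => simp [tcoP2] at h
  | a :: b :: t => simp [tcoP2] at h; simp [tcoP1, h.1]

theorem tcoGoA_char (arr : List Int) :
    tcoGoA arr 0 = tcoW arr ∧
    tcoGoA arr 1 = (tcoP2 arr || tcoW arr) ∧
    tcoGoA arr 2 = (tcoP1 arr || tcoW arr) := by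
  induction arr with
  | nil => refine ⟨rfl, ?_, ?_⟩ <;> simp [tcoGoA, tcoW, tcoP1, tcoP2]
  | cons a r ih =>
    obtain ⟨ih0, ih1, ih2⟩ := ih
    by_cases h : PySem.Int.band a 1 ≠ 0
    · refine ⟨?_, ?_, ?_⟩
      · rw [show tcoGoA (a :: r) 0 = tcoGoA r 1 by simp [tcoGoA, h], ih1, tcoW_cons]
        simp only [decide_eq_true h, Bool.true_and]
      · rw [show tcoGoA (a :: r) 1 = tcoGoA r 2 by simp [tcoGoA, h], ih2, tcoW_cons, tcoP2_cons]
        simp only [decide_eq_true h, Bool.true_and]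
        cases hp2 : tcoP2 r
        · simp
        · simp [tcoP2_le_P1 r hp2]
      · rw [show tcoGoA (a :: r) 2 = true by simp [tcoGoA, h]]
        simp [tcoP1, h]
    · have hstep : ∀ c : Int, tcoGoA (a :: r) c = tcoGoA r 0 := by
        intro c; simp [tcoGoA, h]
      refine ⟨?_, ?_, ?_⟩ <;>
        rw [hstep, ih0, tcoW_cons] <;> simp [h, tcoP1, tcoP2_cons]

theorem tcoAlt_eq_W (arr : List Int) : threeConsecutiveOdds1_alt arr = tcoW arr := by
  unfold threeConsecutiveOdds1_alt
  rw [show (1 : Int) = ((1 : Nat) : Int) from rfl, show (2 : Int) = ((2 : Nat) : Int) from rfl,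
      PySem.List.slice_from_natCast, PySem.List.slice_from_natCast]
  induction arr with
  | nil => simp [tcoW]
  | cons a r ih =>
    match r with
    | [] => simp [tcoW]
    | [b] => simp [tcoW]
    | b :: c :: u =>
      simp only [List.drop_succ_cons, List.drop_zero, List.zip_cons_cons, List.any_cons] at *
      rw [ih]
      simp [tcoW]

theorem tcoW_short (arr : List Int) (h : arr.length < 3) : tcoW arr = false := by
  match arr with
  | [] => simp [tcoW]
  | [a] => simp [tcoW]
  | [a, b] => simp [tcoW]
  | a :: b :: c :: t => simp at h; omega

-- ===== VERDICT (by name: the statement is the Claim_ definition above) =====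
theorem threeConsecutiveOdds1_spec : Claim_equal_threeConsecutiveOdds1 := by
  intro arr _
  unfold Spec_threeConsecutiveOdds1 threeConsecutiveOdds1
  rw [tcoAlt_eq_W]
  split_ifs with h
  · exact (tcoW_short arr h).symm
  · exact (tcoGoA_char arr).1
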